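-- pv_equiv track=rewrite | github.com/pywhatwgurl/pywhatwgurl | pywhatwgurl/host.py | _parse_ipv4_number
-- ===== SOURCE A (Python) =====
-- _VALID_DIGITS = {8: "01234567", 10: "0123456789", 16: "0123456789abcdef"}
--
-- def _parse_ipv4_number(s: str) -> int | None:
--     """Parse an IPv4 number component (decimal, octal, or hex)."""
--     if not s:
--         return None
--
--     radix = 10
--
--     if len(s) >= 2 and s[0] == "0" and s[1].lower() == "x":
--         s = s[2:]
--         radix = 16
--     elif s[0] == "0":
--         s = s[1:]
--         radix = 8
--
--     if not s:
--         return 0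
--
--     if not all(c.lower() in _VALID_DIGITS[radix] for c in s):
--         return None
--
--     return int(s, radix)
-- ===== SOURCE B (Python) =====
-- _VALID_DIGITS = {8: "01234567", 10: "0123456789", 16: "0123456789abcdef"}
--
-- def _parse_ipv4_number(s):
--     """Parse an IPv4 number component (decimal, octal, or hex).
--
--     Single fused pass: validation and conversion happen together by looking
--     each character up in the radix's digit string; no int() call."""
--     if not s:
--         return None
--
--     radix = 10
--
--     if len(s) >= 2 and s[0] == "0" and s[1].lower() == "x":
--         s = s[2:]
--         radix = 16
--     elif s[0] == "0":
--         s = s[1:]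
--         radix = 8
--
--     if not s:
--         return 0
--
--     digits = _VALID_DIGITS[radix]
--     value = 0
--     for c in s:
--         idx = digits.find(c.lower())
--         if idx < 0:
--             return None
--         value = value * radix + idx
--     return value
-- ===== Notes on version B (the rewrite author's own statement) =====
-- stated objective: alternative
-- what changed: A validates all characters in one pass and then calls int with the radix; B is a single fused loop that looks each character up in the radix digit string and accumulates value*radix+idx, returning None at the first bad character.
import Mathlib
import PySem

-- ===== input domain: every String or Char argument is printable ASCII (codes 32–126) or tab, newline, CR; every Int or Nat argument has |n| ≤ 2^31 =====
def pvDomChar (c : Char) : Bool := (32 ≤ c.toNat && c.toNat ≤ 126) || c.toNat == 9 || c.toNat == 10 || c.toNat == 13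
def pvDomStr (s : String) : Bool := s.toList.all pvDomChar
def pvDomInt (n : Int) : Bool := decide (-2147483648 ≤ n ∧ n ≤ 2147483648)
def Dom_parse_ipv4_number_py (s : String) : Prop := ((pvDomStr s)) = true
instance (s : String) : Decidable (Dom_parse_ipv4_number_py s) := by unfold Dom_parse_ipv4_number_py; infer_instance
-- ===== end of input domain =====

-- B changes the algorithm's decomposition: one fused validate-and-accumulate pass instead of
-- A's 'all(...)' validation pass followed by int(s, radix); same values everywhere.

-- ===== PORT A =====
-- _VALID_DIGITS[radix]  (module-level dict; radix is always one of its keys here)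
def pvValidDigits (radix : Int) : List Char :=
  if radix = 8 then ['0','1','2','3','4','5','6','7']
  else if radix = 10 then ['0','1','2','3','4','5','6','7','8','9']
  else ['0','1','2','3','4','5','6','7','8','9','a','b','c','d','e','f']

-- int()'s decoding of one digit character; hand port, exact on the characters that pass
-- A's validation (digits 0-9 and hex letters in either case).
def pvCharVal (c : Char) : Int :=
  if 48 ≤ c.toNat ∧ c.toNat ≤ 57 then (c.toNat : Int) - 48
  else if 97 ≤ c.toNat then (c.toNat : Int) - 87
  else (c.toNat : Int) - 55

-- hand port of int(s, radix): positional value; exact on the nonempty, validated digit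
-- strings (no sign/whitespace/underscore/prefix) on which A reaches this call.
def pvIntBase (cs : List Char) (radix : Int) : Int :=
  cs.foldl (fun a c => a * radix + pvCharVal c) 0

-- prefix/radix selection shared by both Pythons (their first three branches are identical)
def pvPrefix (cs : List Char) : List Char × Int :=
  match cs with
  | '0' :: c1 :: rest =>
      if PySem.Chars.lowerChar c1 = 'x' then (rest, 16) else (c1 :: rest, 8)
  | '0' :: rest => (rest, 8)
  | _ => (cs, 10)

def parse_ipv4_number_py (s : String) : Option Int :=
  if s.toList = [] then none
  else
    let (rest, radix) := pvPrefix s.toList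
    if rest = [] then some 0
    else if rest.all (fun c => (pvValidDigits radix).contains (PySem.Chars.lowerChar c))
    then some (pvIntBase rest radix)
    else none

-- ===== PORT B =====
-- the fused loop of Source B: value accumulates; digits.find(c.lower()) < 0 aborts with None
def pvAltLoop (digits : List Char) (radix : Int) (value : Int) : List Char → Option Int
  | [] => some value
  | c :: rest =>
      let idx := PySem.Chars.find digits [PySem.Chars.lowerChar c]
      if idx < 0 then none
      else pvAltLoop digits radix (value * radix + idx) rest

def parse_ipv4_number_py_alt (s : String) : Option Int :=
  if s.toList = [] then none
  else
    let (rest, radix) := pvPrefix s.toList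
    if rest = [] then some 0
    else pvAltLoop (pvValidDigits radix) radix 0 rest

-- ===== PRECONDITION & SPEC =====
def Spec_parse_ipv4_number_py (s : String) (out : Option Int) : Prop := out = parse_ipv4_number_py_alt s
instance (s : String) (out : Option Int) : Decidable (Spec_parse_ipv4_number_py s out) := by unfold Spec_parse_ipv4_number_py; infer_instance

-- ===== CLAIM (what is proved, stated in full; the proofs are below) =====
def Claim_equal_parse_ipv4_number_py : Prop := ∀ (s : String), Dom_parse_ipv4_number_py s → Spec_parse_ipv4_number_py s (parse_ipv4_number_py s)

-- ===== LEMMAS AND PROOFS =====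

-- a digit's value is unchanged by lowercasing (uppercase letters shift by 32, matching the branch shift)
theorem pvCharVal_lowerChar (c : Char) : pvCharVal (PySem.Chars.lowerChar c) = pvCharVal c := by
  unfold PySem.Chars.lowerChar PySem.Chars.isupper
  by_cases h : 'A' ≤ c ∧ c ≤ 'Z'
  · have hA : (65 : Nat) ≤ c.toNat := h.1
    have hZ : c.toNat ≤ (90 : Nat) := h.2
    have hval : (c.toNat + 32).isValidChar := by
      left; omega
    have : (Char.ofNat (c.toNat + 32)).toNat = c.toNat + 32 := by
      rw [Char.toNat_ofNat]; simp [hval]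
    simp only [h.1, h.2, decide_true, Bool.and_self, if_true, pvCharVal, this]
    split_ifs <;> omega
  · have : ¬ (decide ('A' ≤ c) && decide (c ≤ 'Z')) = true := by
      simpa [Decidable.not_and_iff_not_or_not] using h
    simp [this]

-- on each concrete digit list, find of a member digit is its pvCharVal, and that value is nonnegative
theorem pvFind_mem (radix : Int) (hr : radix = 8 ∨ radix = 10 ∨ radix = 16)
    (d : Char) (hd : d ∈ pvValidDigits radix) :
    PySem.Chars.find (pvValidDigits radix) [d] = pvCharVal d ∧ 0 ≤ pvCharVal d := by
  rcases hr with h | h | h <;> subst h <;> fin_cases hd <;> constructor <;> decide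

-- find = -1 exactly when the (single) character is not in the digit list
theorem pvFind_not_mem (D : List Char) (d : Char) (hd : d ∉ D) :
    PySem.Chars.find D [d] = -1 := by
  rw [PySem.Chars.find_eq_neg_one_iff]
  simpa [List.singleton_infix_iff] using hd

-- the fused loop equals "validate with all(...), then positional conversion from any accumulator"
theorem pvAltLoop_eq (radix : Int) (hr : radix = 8 ∨ radix = 10 ∨ radix = 16) :
    ∀ (cs : List Char) (acc : Int),
      pvAltLoop (pvValidDigits radix) radix acc cs =
        if cs.all (fun c => (pvValidDigits radix).contains (PySem.Chars.lowerChar c))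
        then some (cs.foldl (fun a c => a * radix + pvCharVal c) acc)
        else none := by
  intro cs
  induction cs with
  | nil => intro acc; simp [pvAltLoop]
  | cons c rest ih =>
    intro acc
    by_cases hc : PySem.Chars.lowerChar c ∈ pvValidDigits radix
    · obtain ⟨hfind, hnn⟩ := pvFind_mem radix hr _ hc
      rw [pvCharVal_lowerChar] at hfind hnn
      have hnl : ¬ PySem.Chars.find (pvValidDigits radix) [PySem.Chars.lowerChar c] < 0 := by
        rw [hfind]; omega
      simp only [pvAltLoop, hfind, ih, List.all_cons, List.foldl_cons,
        List.elem_eq_contains.symm, List.elem_iff.mpr hc, Bool.true_and]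
      rw [if_neg (by omega : ¬ pvCharVal c < 0)]
    · have hfind := pvFind_not_mem _ _ hc
      have hlt : PySem.Chars.find (pvValidDigits radix) [PySem.Chars.lowerChar c] < 0 := by
        rw [hfind]; omega
      have hcf : (pvValidDigits radix).contains (PySem.Chars.lowerChar c) = false := by
        simpa using hc
      simp [pvAltLoop, hlt, List.all_cons, hc]


-- the selected radix is always one of the three dict keys
theorem pvPrefix_radix (cs : List Char) :
    (pvPrefix cs).2 = 8 ∨ (pvPrefix cs).2 = 10 ∨ (pvPrefix cs).2 = 16 := by
  unfold pvPrefix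
  split
  · split <;> simp
  · simp
  · simp

-- ===== VERDICT (by name: the statement is the Claim_ definition above) =====
theorem parse_ipv4_number_py_spec : Claim_equal_parse_ipv4_number_py := by
  intro s _
  unfold Spec_parse_ipv4_number_py parse_ipv4_number_py parse_ipv4_number_py_alt
  by_cases h : s.toList = []
  · simp [h]
  · simp only [h, if_false]
    rcases hpr : pvPrefix s.toList with ⟨rest, radix⟩
    have hr : radix = 8 ∨ radix = 10 ∨ radix = 16 := by
      have := pvPrefix_radix s.toList
      rw [hpr] at this; exact this
    by_cases hrest : rest = []
    · simp [hrest]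
    · simp only [hrest, if_false, pvAltLoop_eq radix hr rest 0, pvIntBase]
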